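-- pv_equiv track=rewrite | github.com/tead1234/BackjoonAlgorithm | Algorithm/Pro_level3/ㄻㄹ.py | solution
-- ===== SOURCE A (Python) =====
-- def solution(board):
--     answer = -1
--     ansL = []
--     vis= [[False] * len(board) for _ in range(len(board))]
--     def dfs(x,y,depth,visited):
--         vis[x][y] = True
--         dir = [(-1,0),(0,-1),(1,0),(0,1)]
--         for k in range(4):
--             dx,dy = dir[k]
--             if len(board) > dx+ x >= 0 and len(board) > dy+ y >= 0:
--                 if board[dx+ x][dy+ y] == board[x][y] and visited[dx+ x][dy+ y] == False:
--                     dfs(dx+ x,dy+ y,depth+1,visited)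
--                     visited[dx+ x][dy+ y] = False
--         ansL.append(depth)
--     for i in range(len(board)):
--         for j in range(len(board)):
--             dfs(i,j,1,vis)
--             vis = [[False] * len(board) for _ in range(len(board))]
--     answer = max(ansL)
--     if answer == 1:
--         return -1
--     else:
--         return answer
-- ===== SOURCE B (Python) =====
-- def solution(board):
--     n = len(board)
--
--     def longest(x, y, avail):
--         # longest equal-value simple path starting at (x, y); avail = still-usable cells
--         avail = avail - {(x, y)}
--         best = 0
--         for nx, ny in ((x - 1, y), (x, y - 1), (x + 1, y), (x, y + 1)):
--             if (nx, ny) in avail and board[nx][ny] == board[x][y]: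
--                 best = max(best, longest(nx, ny, avail))
--         return 1 + best
--
--     cells = {(i, j) for i in range(n) for j in range(n)}
--     answer = max(longest(i, j, cells) for i in range(n) for j in range(n))
--     return -1 if answer == 1 else answer
-- ===== Notes on version B (the rewrite author's own statement) =====
-- stated objective: alternative
-- what changed: B replaces the shared mutable visited grid, the backtracking unmark and the global list of appended depths by a pure recursion over a persistent SET of still-available cells: longest(x,y,avail) removes (x,y) from an immutable set and returns 1 + max over equal-valued neighbors still in the set, so there is no mutation, no unmarking and no depth accumulator at all.
import Mathlib
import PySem

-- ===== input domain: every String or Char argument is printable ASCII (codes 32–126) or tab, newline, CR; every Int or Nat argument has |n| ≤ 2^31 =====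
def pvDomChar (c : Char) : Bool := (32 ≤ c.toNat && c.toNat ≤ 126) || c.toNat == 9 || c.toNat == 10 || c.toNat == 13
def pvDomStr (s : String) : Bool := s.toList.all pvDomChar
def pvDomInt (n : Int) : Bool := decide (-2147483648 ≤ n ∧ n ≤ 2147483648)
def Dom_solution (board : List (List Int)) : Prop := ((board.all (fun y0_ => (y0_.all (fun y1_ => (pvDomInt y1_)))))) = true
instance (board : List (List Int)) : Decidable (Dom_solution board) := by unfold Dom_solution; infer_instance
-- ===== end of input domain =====

-- B replaces A's shared mutable visited grid + backtracking unmark + global list of depths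
-- by a pure recursion over a persistent set of still-available cells; objective: alternative.

-- ===== PORT A =====
def pvDirs : List (Int × Int) := [(-1, 0), (0, -1), (1, 0), (0, 1)]

-- board[x][y]; every access is guarded in range, rows long enough by Pre_, so the
-- default 0 is never produced inside Pre_
def bget (b : List (List Int)) (x y : Int) : Int :=
  PySem.List.pyGetD (PySem.List.pyGetD b x []) y 0

-- visited[x][y]
def gget (g : List (List Bool)) (x y : Int) : Bool :=
  PySem.List.pyGetD (PySem.List.pyGetD g x []) y false

-- visited[x][y] = v; .toNat is exact here: every caller guards 0 ≤ x, 0 ≤ y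
def gset (g : List (List Bool)) (x y : Int) (v : Bool) : List (List Bool) :=
  g.set x.toNat ((PySem.List.pyGetD g x []).set y.toNat v)

-- [[False] * len(board) for _ in range(len(board))]
def freshVis (n : Nat) : List (List Bool) := List.replicate n (List.replicate n false)

-- the body of A's 'for k in range(4)' loop (rec = the recursive call at the current fuel)
def bodyA (board : List (List Int)) (x y depth : Int)
    (rec : Int → Int → Int → List (List Bool) → List Int × List (List Bool))
    (st : List Int × List (List Bool)) (d : Int × Int) : List Int × List (List Bool) :=
  let nx := d.1 + x
  let ny := d.2 + y
  if (board.length : Int) > nx ∧ nx ≥ 0 ∧ (board.length : Int) > ny ∧ ny ≥ 0 then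
    if bget board nx ny = bget board x y ∧ gget st.2 nx ny = false then
      let r := rec nx ny (depth + 1) st.2
      (st.1 ++ r.1, gset r.2 nx ny false)
    else st
  else st

-- A's dfs: marks the cell (vis and visited alias the same list in the Python), recurses,
-- unmarks each neighbor after its call, appends depth; returns (appended depths, visited).
-- fuel = number of still-unvisited cells bounds the recursion depth; it is n*n at the top.
def dfsA (board : List (List Int)) : Nat → Int → Int → Int → List (List Bool) → List Int × List (List Bool)
  | 0, _, _, _, vis => ([], vis)
  | fuel + 1, x, y, depth, vis =>
    let st := pvDirs.foldl (bodyA board x y depth (fun nx ny dep v => dfsA board fuel nx ny dep v))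
      ([], gset vis x y true)
    (st.1 ++ [depth], st.2)

def solution (board : List (List Int)) : Int :=
  let n := board.length
  let ansL := (PySem.List.pyRange 0 (n : Int) 1).foldl (fun acc i =>
      (PySem.List.pyRange 0 (n : Int) 1).foldl (fun acc j =>
        acc ++ (dfsA board (n * n) i j 1 (freshVis n)).1) acc) []
  match PySem.List.max? ansL (fun v => v) with   -- max(ansL): ValueError on [] is outside Pre_
  | some answer => if answer = 1 then -1 else answer
  | none => -1

-- ===== PORT B =====
-- the four neighbor coordinates B writes out literally
def pvNbrs (x y : Int) : List (Int × Int) := [(x - 1, y), (x, y - 1), (x + 1, y), (x, y + 1)]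

-- B's longest: remove (x, y) from the persistent set, 1 + max over usable neighbors.
-- fuel = |avail| at the top call bounds the recursion depth (each call shrinks avail).
def longestB (board : List (List Int)) : Nat → Int → Int → PySem.Set (Int × Int) → Int
  | 0, _, _, _ => 1
  | fuel + 1, x, y, avail =>
    let avail' := PySem.Set.diff avail [(x, y)]
    1 + (pvNbrs x y).foldl (fun best p =>
      if p ∈ avail' ∧ bget board p.1 p.2 = bget board x y
      then max best (longestB board fuel p.1 p.2 avail') else best) 0

-- {(i, j) for i in range(n) for j in range(n)}
def allCells (n : Nat) : PySem.Set (Int × Int) :=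
  PySem.Set.ofList ((PySem.List.pyRange 0 (n : Int) 1).flatMap (fun i =>
    (PySem.List.pyRange 0 (n : Int) 1).map (fun j => (i, j))))

def solution_alt (board : List (List Int)) : Int :=
  let n := board.length
  let cells := allCells n
  let vals := (PySem.List.pyRange 0 (n : Int) 1).foldl (fun acc i =>
      (PySem.List.pyRange 0 (n : Int) 1).foldl (fun acc j =>
        acc ++ [longestB board (n * n) i j cells]) acc) []
  match PySem.List.max? vals (fun v => v) with  -- max() on the empty generator is outside Pre_
  | some answer => if answer = 1 then -1 else answer
  | none => -1

-- ===== PRECONDITION & SPEC =====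
-- Pre_ excludes only inputs where the Python A raises: the empty board (ValueError from max of an empty list)
-- and boards with ≥ 2 rows where some row is shorter than len(board) (IndexError);
-- a 1×1 board never indexes into its row, so any single-row board is admitted.
def Pre_solution (board : List (List Int)) : Prop :=
  board ≠ [] ∧ (board.length = 1 ∨ ∀ row ∈ board, board.length ≤ row.length)
instance (board : List (List Int)) : Decidable (Pre_solution board) := by
  unfold Pre_solution; infer_instance

def pvWitness_solution : List (List Int) := [[1, 1], [2, 1]]

def Spec_solution (board : List (List Int)) (out : Int) : Prop := out = solution_alt board
instance (board : List (List Int)) (out : Int) : Decidable (Spec_solution board out) := by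
  unfold Spec_solution; infer_instance

-- ===== CLAIM (what is proved, stated in full; the proofs are below) =====
def Claim_equal_solution : Prop := ∀ (board : List (List Int)), Dom_solution board → Pre_solution board → Spec_solution board (solution board)

-- ===== LEMMAS AND PROOFS =====

-- proof-only shorthand: max(l) as an Option, and the max of two optional maxima
def M (l : List Int) : Option Int := PySem.List.max? l (fun v => v)

def omax : Option Int → Option Int → Option Int
  | none, b => b
  | some a, none => some a
  | some a, some b => some (max a b)

-- the visited grid is an n × n matrix
def GInv (n : Nat) (g : List (List Bool)) : Prop := g.length = n ∧ ∀ r ∈ g, r.length = n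

-- the set avail of B mirrors the unvisited in-range cells of A's grid g
def Match (n : Nat) (g : List (List Bool)) (avail : List (Int × Int)) : Prop :=
  ∀ p : Int × Int, p ∈ avail ↔
    (0 ≤ p.1 ∧ p.1 < (n : Int) ∧ 0 ≤ p.2 ∧ p.2 < (n : Int) ∧ gget g p.1 p.2 = false)

-- number of unvisited cells: the termination measure the fuel dominates
def falseCount (g : List (List Bool)) : Nat := (g.map (fun r => r.count false)).sum

-- invariant tying A's list of appended depths to B's running best
def GRel (depth : Int) (acc : List Int) (b : Int) : Prop :=
  (acc = [] ∧ b = 0) ∨ (1 ≤ b ∧ M acc = some (depth + b))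

lemma foldl_max_out (t : List Int) : ∀ (a y : Int), t.foldl max (max a y) = max a (t.foldl max y) := by
  induction t with
  | nil => intro a y; rfl
  | cons z t ih =>
    intro a y
    simp only [List.foldl_cons]
    rw [max_assoc, ih]

lemma M_nil : M [] = none := rfl

lemma M_cons (x : Int) (t : List Int) : M (x :: t) = some (t.foldl max x) :=
  PySem.List.max?_id_cons x t

lemma M_append (l1 l2 : List Int) : M (l1 ++ l2) = omax (M l1) (M l2) := by
  cases l1 with
  | nil => simp [M_nil, omax]
  | cons x t =>
    cases l2 with
    | nil => rw [List.append_nil, M_nil, M_cons]; rfl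
    | cons y t2 =>
      rw [List.cons_append, M_cons, M_cons, M_cons]
      simp only [omax]
      rw [List.foldl_append, List.foldl_cons, foldl_max_out]

-- index bookkeeping for an in-range (x, y) into an n × n grid
lemma grid_idx {n : Nat} {g : List (List Bool)} {x y : Int}
    (hInv : GInv n g) (h1 : 0 ≤ x) (h2 : x < (n : Int)) (h3 : 0 ≤ y) (h4 : y < (n : Int)) :
    ∃ (hx : x.toNat < g.length), y.toNat < (g[x.toNat]'hx).length := by
  obtain ⟨hlen, hrows⟩ := hInv
  have hx : x.toNat < g.length := by omega
  exact ⟨hx, by have := hrows _ (g.getElem_mem hx); omega⟩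

lemma pyGetD_nonneg {α : Type} (xs : List α) (i : Int) (d : α) (h : 0 ≤ i) :
    PySem.List.pyGetD xs i d = xs.getD i.toNat d := by
  rw [show i = ((i.toNat : Nat) : Int) from (Int.toNat_of_nonneg h).symm,
      PySem.List.pyGetD_natCast, Int.toNat_natCast]

lemma gget_elem {n : Nat} {g : List (List Bool)} {x y : Int}
    (_hInv : GInv n g) (h1 : 0 ≤ x) (_h2 : x < (n : Int)) (h3 : 0 ≤ y) (_h4 : y < (n : Int))
    (hx : x.toNat < g.length) (hy : y.toNat < (g[x.toNat]'hx).length) :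
    gget g x y = (g[x.toNat]'hx)[y.toNat]'hy := by
  unfold gget
  rw [pyGetD_nonneg _ _ _ h1, pyGetD_nonneg _ _ _ h3,
      List.getD_eq_getElem _ _ hx, List.getD_eq_getElem _ _ hy]

lemma gset_elem {n : Nat} {g : List (List Bool)} {x y : Int} {v : Bool}
    (_hInv : GInv n g) (h1 : 0 ≤ x) (_h2 : x < (n : Int)) (_h3 : 0 ≤ y) (_h4 : y < (n : Int))
    (hx : x.toNat < g.length) :
    gset g x y v = g.set x.toNat ((g[x.toNat]'hx).set y.toNat v) := by
  unfold gset
  rw [pyGetD_nonneg _ _ _ h1, List.getD_eq_getElem _ _ hx]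

lemma Inv_gset {n : Nat} {g : List (List Bool)} {x y : Int} {v : Bool}
    (hInv : GInv n g) (h1 : 0 ≤ x) (h2 : x < (n : Int)) (h3 : 0 ≤ y) (h4 : y < (n : Int)) :
    GInv n (gset g x y v) := by
  obtain ⟨hx, hy⟩ := grid_idx hInv h1 h2 h3 h4
  rw [gset_elem hInv h1 h2 h3 h4 hx]
  obtain ⟨hlen, hrows⟩ := hInv
  refine ⟨by simpa using hlen, ?_⟩
  intro r hr
  rcases List.mem_or_eq_of_mem_set hr with h | h
  · exact hrows r h
  · subst h; simpa using hrows _ (g.getElem_mem hx)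

-- reading the grid after gset: the set cell, and any other in-range cell
lemma gget_gset_self {n : Nat} {g : List (List Bool)} {x y : Int} {v : Bool}
    (hInv : GInv n g) (h1 : 0 ≤ x) (h2 : x < (n : Int)) (h3 : 0 ≤ y) (h4 : y < (n : Int)) :
    gget (gset g x y v) x y = v := by
  obtain ⟨hx, hy⟩ := grid_idx hInv h1 h2 h3 h4
  have hInv' := Inv_gset (v := v) hInv h1 h2 h3 h4
  rw [gset_elem hInv h1 h2 h3 h4 hx] at hInv' ⊢
  obtain ⟨hx', hy'⟩ := grid_idx hInv' h1 h2 h3 h4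
  rw [gget_elem hInv' h1 h2 h3 h4 hx' hy']
  simp only [List.getElem_set_self]

lemma gget_gset_ne {n : Nat} {g : List (List Bool)} {x y p q : Int} {v : Bool}
    (hInv : GInv n g) (h1 : 0 ≤ x) (h2 : x < (n : Int)) (h3 : 0 ≤ y) (h4 : y < (n : Int))
    (k1 : 0 ≤ p) (k2 : p < (n : Int)) (k3 : 0 ≤ q) (k4 : q < (n : Int))
    (hne : (p, q) ≠ (x, y)) :
    gget (gset g x y v) p q = gget g p q := by
  obtain ⟨hx, hy⟩ := grid_idx hInv h1 h2 h3 h4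
  obtain ⟨hp, hq⟩ := grid_idx hInv k1 k2 k3 k4
  have hInv' := Inv_gset (v := v) hInv h1 h2 h3 h4
  rw [gset_elem hInv h1 h2 h3 h4 hx] at hInv' ⊢
  obtain ⟨hp', hq'⟩ := grid_idx hInv' k1 k2 k3 k4
  rw [gget_elem hInv' k1 k2 k3 k4 hp' hq', gget_elem hInv k1 k2 k3 k4 hp hq]
  by_cases hxp : p.toNat = x.toNat
  · have hxe : p = x := by omega
    have hye : q ≠ y := fun h => hne (by rw [hxe, h])
    have hqy : y.toNat ≠ q.toNat := by omega
    simp only [hxp, List.getElem_set_self, List.getElem_set_ne hqy]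
  · simp only [List.getElem_set_ne (show x.toNat ≠ p.toNat by omega)]

lemma count_set_true (r : List Bool) : ∀ (j : Nat) (h : j < r.length), r[j] = false →
    (r.set j true).count false + 1 = r.count false := by
  induction r with
  | nil => intro j h; simp at h
  | cons b t ih =>
    intro j h hf
    cases j with
    | zero =>
      simp at hf; subst hf
      simp
    | succ j =>
      simp only [List.set_cons_succ, List.count_cons]
      have := ih j (by simpa using h) (by simpa using hf)
      omega

lemma falseCount_set (g : List (List Bool)) : ∀ (i : Nat) (h : i < g.length) (r : List Bool),
    falseCount (g.set i r) + (g[i]'h).count false = falseCount g + r.count false := by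
  induction g with
  | nil => intro i h; simp at h
  | cons q t ih =>
    intro i h r
    cases i with
    | zero => simp [falseCount]; omega
    | succ i =>
      simp only [List.set_cons_succ, falseCount, List.map_cons, List.sum_cons, List.getElem_cons_succ]
      have := ih i (by simpa using h) r
      simp only [falseCount] at this
      omega

lemma falseCount_mark {n : Nat} {g : List (List Bool)} {x y : Int}
    (hInv : GInv n g) (h1 : 0 ≤ x) (h2 : x < (n : Int)) (h3 : 0 ≤ y) (h4 : y < (n : Int))
    (hf : gget g x y = false) :
    falseCount (gset g x y true) + 1 = falseCount g := by
  obtain ⟨hx, hy⟩ := grid_idx hInv h1 h2 h3 h4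
  rw [gget_elem hInv h1 h2 h3 h4 hx hy] at hf
  rw [gset_elem hInv h1 h2 h3 h4 hx]
  have h5 := falseCount_set g x.toNat hx ((g[x.toNat]'hx).set y.toNat true)
  have h6 := count_set_true (g[x.toNat]'hx) y.toNat hy hf
  omega

lemma falseCount_pos {n : Nat} {g : List (List Bool)} {x y : Int}
    (hInv : GInv n g) (h1 : 0 ≤ x) (h2 : x < (n : Int)) (h3 : 0 ≤ y) (h4 : y < (n : Int))
    (hf : gget g x y = false) :
    1 ≤ falseCount g := by
  obtain ⟨hx, hy⟩ := grid_idx hInv h1 h2 h3 h4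
  rw [gget_elem hInv h1 h2 h3 h4 hx hy] at hf
  have hmem : false ∈ g[x.toNat]'hx := hf ▸ List.getElem_mem hy
  have hc : 1 ≤ (g[x.toNat]'hx).count false := List.count_pos_iff.mpr hmem
  have : (g[x.toNat]'hx).count false ∈ g.map (fun r => r.count false) :=
    List.mem_map_of_mem (g.getElem_mem hx)
  have := List.single_le_sum (l := g.map (fun r => r.count false)) (by intro x _; omega) _ this
  unfold falseCount
  omega

lemma set_getElem_eq {α : Type} (l : List α) {v : α} : ∀ (i : Nat) (h : i < l.length), l[i] = v →
    l.set i v = l := by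
  induction l with
  | nil => intro i h; simp at h
  | cons b t ih =>
    intro i h hv
    cases i with
    | zero => simp at hv; simp [hv]
    | succ i => simp only [List.set_cons_succ]; rw [ih i (by simpa using h) (by simpa using hv)]

lemma gset_unmark {n : Nat} {g : List (List Bool)} {x y : Int}
    (hInv : GInv n g) (h1 : 0 ≤ x) (h2 : x < (n : Int)) (h3 : 0 ≤ y) (h4 : y < (n : Int))
    (hf : gget g x y = false) :
    gset (gset g x y true) x y false = g := by
  obtain ⟨hx, hy⟩ := grid_idx hInv h1 h2 h3 h4
  rw [gget_elem hInv h1 h2 h3 h4 hx hy] at hf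
  have hInv' := Inv_gset (v := true) hInv h1 h2 h3 h4
  rw [gset_elem hInv h1 h2 h3 h4 hx] at hInv' ⊢
  have hx' : x.toNat < (g.set x.toNat ((g[x.toNat]'hx).set y.toNat true)).length := by
    simpa using hx
  rw [gset_elem hInv' h1 h2 h3 h4 hx']
  rw [List.getElem_set_self]
  rw [List.set_set, List.set_set]
  rw [set_getElem_eq _ y.toNat hy hf]
  exact set_getElem_eq _ x.toNat hx rfl

-- marking (x, y) in the grid corresponds to removing it from the set
lemma Match_step {n : Nat} {g : List (List Bool)} {avail : List (Int × Int)} {x y : Int}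
    (hM : Match n g avail) (hInv : GInv n g)
    (h1 : 0 ≤ x) (h2 : x < (n : Int)) (h3 : 0 ≤ y) (h4 : y < (n : Int)) :
    Match n (gset g x y true) (PySem.Set.diff avail [(x, y)]) := by
  intro p
  rw [PySem.Set.mem_diff]
  constructor
  · rintro ⟨hp, hnot⟩
    obtain ⟨k1, k2, k3, k4, kf⟩ := (hM p).mp hp
    have hne : p ≠ (x, y) := by simpa using hnot
    refine ⟨k1, k2, k3, k4, ?_⟩
    rw [show p = (p.1, p.2) from rfl] at hne
    rw [gget_gset_ne hInv h1 h2 h3 h4 k1 k2 k3 k4 hne]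
    exact kf
  · rintro ⟨k1, k2, k3, k4, kf⟩
    by_cases hne : (p.1, p.2) = (x, y)
    · exfalso
      have : gget (gset g x y true) p.1 p.2 = true := by
        rw [show p.1 = x from congrArg Prod.fst hne, show p.2 = y from congrArg Prod.snd hne]
        exact gget_gset_self hInv h1 h2 h3 h4
      rw [this] at kf; exact Bool.noConfusion kf
    · rw [gget_gset_ne hInv h1 h2 h3 h4 k1 k2 k3 k4 hne] at kf
      refine ⟨(hM p).mpr ⟨k1, k2, k3, k4, kf⟩, by simpa using (show p ≠ (x, y) from fun h => hne (by rw [h]))⟩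

-- the per-direction fold: A keeps the grid equal to the marked grid and GRel ties the accumulators
lemma fold_rel (board : List (List Int)) (fuel : Nat)
    (ih : ∀ (x y depth : Int) (vis : List (List Bool)) (avail : List (Int × Int)),
      GInv board.length vis → Match board.length vis avail →
      0 ≤ x → x < (board.length : Int) → 0 ≤ y → y < (board.length : Int) →
      gget vis x y = false → falseCount vis ≤ fuel →
      (dfsA board fuel x y depth vis).2 = gset vis x y true ∧
      1 ≤ longestB board fuel x y avail ∧
      M (dfsA board fuel x y depth vis).1 = some (depth - 1 + longestB board fuel x y avail)) :
    ∀ (ds : List (Int × Int)) (x y depth : Int) (v1 : List (List Bool)) (avail : List (Int × Int)),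
    GInv board.length v1 → Match board.length v1 avail → falseCount v1 ≤ fuel →
    ∀ (aA : List Int) (bB : Int), GRel depth aA bB →
    (ds.foldl (bodyA board x y depth (fun nx ny dep v => dfsA board fuel nx ny dep v)) (aA, v1)).2 = v1 ∧
    GRel depth
      (ds.foldl (bodyA board x y depth (fun nx ny dep v => dfsA board fuel nx ny dep v)) (aA, v1)).1
      ((ds.map (fun d => (d.1 + x, d.2 + y))).foldl (fun best p =>
        if p ∈ avail ∧ bget board p.1 p.2 = bget board x y
        then max best (longestB board fuel p.1 p.2 avail) else best) bB) := by
  intro ds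
  induction ds with
  | nil => intro x y depth v1 avail hInv hM hfc aA bB hR; exact ⟨rfl, hR⟩
  | cons d ds ihds =>
    intro x y depth v1 avail hInv hM hfc aA bB hR
    simp only [List.foldl_cons, List.map_cons]
    have hmem := hM (d.1 + x, d.2 + y)
    by_cases hc : (d.1 + x, d.2 + y) ∈ avail ∧ bget board (d.1 + x) (d.2 + y) = bget board x y
    · -- the neighbor is taken by both programs
      obtain ⟨k1, k2, k3, k4, kf⟩ := hmem.mp hc.1
      have hfc1 : falseCount v1 ≤ fuel := hfc
      obtain ⟨cA2, cB1, cM⟩ := ih (d.1 + x) (d.2 + y) (depth + 1) v1 avail hInv hM k1 k2 k3 k4 kf hfc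
      have stepA : bodyA board x y depth (fun nx ny dep v => dfsA board fuel nx ny dep v) (aA, v1) d
          = (aA ++ (dfsA board fuel (d.1 + x) (d.2 + y) (depth + 1) v1).1, v1) := by
        unfold bodyA
        rw [if_pos ⟨k2, k1, k4, k3⟩]
        simp only
        rw [if_pos ⟨hc.2, kf⟩]
        simp only [cA2]
        rw [gset_unmark hInv k1 k2 k3 k4 kf]
      have stepB : (if (d.1 + x, d.2 + y) ∈ avail ∧
            bget board (d.1 + x, d.2 + y).1 (d.1 + x, d.2 + y).2 = bget board x y
          then max bB (longestB board fuel (d.1 + x, d.2 + y).1 (d.1 + x, d.2 + y).2 avail) else bB)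
          = max bB (longestB board fuel (d.1 + x) (d.2 + y) avail) := by
        rw [if_pos hc]
      rw [stepA, stepB]
      refine ihds x y depth v1 avail hInv hM hfc _ _ ?_
      right
      constructor
      · rcases hR with ⟨_, hb0⟩ | ⟨hb1, _⟩ <;> omega
      · rw [M_append, cM]
        rcases hR with ⟨ha, hb0⟩ | ⟨hb1, hMacc⟩
        · subst ha; subst hb0
          simp [M_nil, omax]
          omega
        · rw [hMacc]
          simp only [omax, Option.some.injEq]
          omega
    · -- the neighbor is skipped by both programs
      have stepB : (if (d.1 + x, d.2 + y) ∈ avail ∧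
            bget board (d.1 + x, d.2 + y).1 (d.1 + x, d.2 + y).2 = bget board x y
          then max bB (longestB board fuel (d.1 + x, d.2 + y).1 (d.1 + x, d.2 + y).2 avail) else bB)
          = bB := by
        rw [if_neg hc]
      rw [stepB]
      have stepA : bodyA board x y depth (fun nx ny dep v => dfsA board fuel nx ny dep v) (aA, v1) d
          = (aA, v1) := by
        unfold bodyA
        by_cases hb : (board.length : Int) > d.1 + x ∧ d.1 + x ≥ 0 ∧ (board.length : Int) > d.2 + y ∧ d.2 + y ≥ 0
        · rw [if_pos hb]
          simp only
          rw [if_neg]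
          intro hcc
          exact hc ⟨hmem.mpr ⟨hb.2.1, hb.1, hb.2.2.2, hb.2.2.1, hcc.2⟩, hcc.1⟩
        · rw [if_neg hb]
      rw [stepA]
      exact ihds x y depth v1 avail hInv hM hfc aA bB hR

-- the neighbor list B writes literally is A's offsets shifted by (x, y)
lemma nbrs_eq_map (x y : Int) : pvNbrs x y = pvDirs.map (fun d => (d.1 + x, d.2 + y)) := by
  simp only [pvNbrs, pvDirs, List.map_cons, List.map_nil, List.cons.injEq, Prod.mk.injEq,
    and_true]
  refine ⟨⟨by ring, by ring⟩, ⟨by ring, by ring⟩, ⟨by ring, by ring⟩, by ring, by ring⟩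

-- the heart of the equivalence: on one start cell the max of A's appended depths is
-- depth - 1 + B's returned path length, and A's grid ends marked at (x, y)
lemma dfs_rel (board : List (List Int)) : ∀ (fuel : Nat) (x y depth : Int)
    (vis : List (List Bool)) (avail : List (Int × Int)),
    GInv board.length vis → Match board.length vis avail →
    0 ≤ x → x < (board.length : Int) → 0 ≤ y → y < (board.length : Int) →
    gget vis x y = false → falseCount vis ≤ fuel →
    (dfsA board fuel x y depth vis).2 = gset vis x y true ∧
    1 ≤ longestB board fuel x y avail ∧
    M (dfsA board fuel x y depth vis).1 = some (depth - 1 + longestB board fuel x y avail) := by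
  intro fuel
  induction fuel with
  | zero =>
    intro x y depth vis avail hInv hM h1 h2 h3 h4 hf hfc
    have := falseCount_pos hInv h1 h2 h3 h4 hf
    omega
  | succ fuel ihf =>
    intro x y depth vis avail hInv hM h1 h2 h3 h4 hf hfc
    have hInv1 := Inv_gset (v := true) hInv h1 h2 h3 h4
    have hM1 := Match_step hM hInv h1 h2 h3 h4
    have hfc1 : falseCount (gset vis x y true) ≤ fuel := by
      have := falseCount_mark hInv h1 h2 h3 h4 hf
      omega
    obtain ⟨fA, fR⟩ := fold_rel board fuel ihf pvDirs x y depth (gset vis x y true)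
      (PySem.Set.diff avail [(x, y)]) hInv1 hM1 hfc1
      [] 0 (Or.inl ⟨rfl, rfl⟩)
    rw [← nbrs_eq_map] at fR
    simp only [dfsA, longestB]
    refine ⟨fA, ?_, ?_⟩
    · rcases fR with ⟨_, hb0⟩ | ⟨hb1, _⟩ <;> omega
    · rw [M_append]
      rcases fR with ⟨ha, hb0⟩ | ⟨hb1, hMacc⟩
      · rw [ha, hb0, M_nil]
        simp only [omax, M_cons, List.foldl_nil, Option.some.injEq]
        omega
      · rw [hMacc]
        simp only [M_cons, List.foldl_nil, omax, Option.some.injEq]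
        omega

lemma Inv_fresh (n : Nat) : GInv n (freshVis n) := by
  unfold freshVis GInv
  constructor
  · simp
  · intro r hr
    rw [List.eq_of_mem_replicate hr]
    simp

lemma pyGetD_all {α : Type} (P : α → Prop) (xs : List α) (i : Int) (d : α)
    (hP : ∀ a ∈ xs, P a) (hd : P d) : P (PySem.List.pyGetD xs i d) := by
  unfold PySem.List.pyGetD
  cases h : PySem.List.pyGet? xs i with
  | none => simpa [h] using hd
  | some a => simpa [h] using hP a (PySem.List.mem_of_pyGet?_eq_some _ h)

lemma gget_fresh (n : Nat) (x y : Int) : gget (freshVis n) x y = false := by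
  unfold gget freshVis
  refine pyGetD_all (fun b => b = false) _ y false ?_ rfl
  refine pyGetD_all (fun r => ∀ b ∈ r, b = false) _ x []
    (fun r hr b hb => ?_) (by simp)
  rw [List.eq_of_mem_replicate hr] at hb
  exact List.eq_of_mem_replicate hb

lemma falseCount_fresh (n : Nat) : falseCount (freshVis n) = n * n := by
  unfold falseCount freshVis
  simp [List.map_replicate]

-- a fresh grid and the full cell set match
lemma Match_fresh (n : Nat) : Match n (freshVis n) (allCells n) := by
  intro p
  unfold allCells
  rw [PySem.Set.mem_ofList, List.mem_flatMap]
  constructor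
  · rintro ⟨i, hi, hp⟩
    obtain ⟨j, hj, hpj⟩ := List.mem_map.mp hp
    obtain ⟨hi1, hi2⟩ := PySem.List.mem_pyRange_one.mp hi
    obtain ⟨hj1, hj2⟩ := PySem.List.mem_pyRange_one.mp hj
    subst hpj
    exact ⟨hi1, hi2, hj1, hj2, gget_fresh n i j⟩
  · rintro ⟨h1, h2, h3, h4, _⟩
    exact ⟨p.1, PySem.List.mem_pyRange_one.mpr ⟨h1, h2⟩,
      List.mem_map.mpr ⟨p.2, PySem.List.mem_pyRange_one.mpr ⟨h3, h4⟩, rfl⟩⟩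

-- glueing the starts: the max over A's concatenated depth lists is the max over B's values
lemma glue_inner (board : List (List Int)) : ∀ (js : List Int),
    (∀ j ∈ js, 0 ≤ j ∧ j < (board.length : Int)) →
    ∀ (i : Int), 0 ≤ i → i < (board.length : Int) →
    ∀ (accA accB : List Int), M accA = M accB →
    M (js.foldl (fun acc j => acc ++ (dfsA board (board.length * board.length) i j 1 (freshVis board.length)).1) accA)
      = M (js.foldl (fun acc j => acc ++ [longestB board (board.length * board.length) i j (allCells board.length)]) accB) := by
  intro js
  induction js with
  | nil => intro _ i _ _ accA accB h; exact h
  | cons j js ihjs =>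
    intro hmem i hi1 hi2 accA accB h
    simp only [List.foldl_cons]
    obtain ⟨hj1, hj2⟩ := hmem j List.mem_cons_self
    obtain ⟨_, _, cM⟩ := dfs_rel board (board.length * board.length) i j 1 (freshVis board.length)
      (allCells board.length) (Inv_fresh board.length) (Match_fresh board.length)
      hi1 hi2 hj1 hj2 (gget_fresh board.length i j)
      (le_of_eq (falseCount_fresh board.length))
    refine ihjs (fun j hj => hmem j (List.mem_cons_of_mem _ hj)) i hi1 hi2 _ _ ?_
    rw [M_append, M_append, h, cM, M_cons]
    simp only [List.foldl_nil]
    norm_num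

lemma glue_outer (board : List (List Int)) : ∀ (is : List Int),
    (∀ i ∈ is, 0 ≤ i ∧ i < (board.length : Int)) →
    ∀ (accA accB : List Int), M accA = M accB →
    M (is.foldl (fun acc i => (PySem.List.pyRange 0 (board.length : Int) 1).foldl
        (fun acc j => acc ++ (dfsA board (board.length * board.length) i j 1 (freshVis board.length)).1) acc) accA)
      = M (is.foldl (fun acc i => (PySem.List.pyRange 0 (board.length : Int) 1).foldl
        (fun acc j => acc ++ [longestB board (board.length * board.length) i j (allCells board.length)]) acc) accB) := by
  intro is
  induction is with
  | nil => intro _ accA accB h; exact h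
  | cons i is ihis =>
    intro hmem accA accB h
    simp only [List.foldl_cons]
    obtain ⟨hi1, hi2⟩ := hmem i List.mem_cons_self
    refine ihis (fun i hi => hmem i (List.mem_cons_of_mem _ hi)) _ _ ?_
    refine glue_inner board _ (fun j hj => ?_) i hi1 hi2 accA accB h
    have := PySem.List.mem_pyRange_one.mp hj
    omega

-- ===== VERDICT (by name: the statement is the Claim_ definition above) =====
theorem solution_spec : Claim_equal_solution := by
  intro board hdom hpre
  unfold Spec_solution
  have h := glue_outer board (PySem.List.pyRange 0 (board.length : Int) 1)
    (fun i hi => by have := PySem.List.mem_pyRange_one.mp hi; omega) [] [] rfl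
  unfold M at h
  show solution board = solution_alt board
  simp only [solution, solution_alt]
  rw [h]
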